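-- pv_equiv track=rewrite | github.com/bhudnell/Past-Work | Python/lab6.py | star_point
-- ===== SOURCE A (Python) =====
-- def star_point(char_lst):
--     """
--     This function takes one parameter, char_lst, which represents a list of
--     strings containing single characters.
--         Example:
--             char_lst = ['a', 'b', '^', 'z', 'D', '*', 'U', '*']
--
--     You will return a new list (you can not alter the original list) that
--     contains all the '*' and '^' string characters moved to the  end of
--     the list. Print the original list to see if you altered it after you are
--     done iterating through it.
--
--     All '^' characters must come before all the '*' characters.
--
--         Example after running the function:
--
--             char_lst = ['a', 'b', '^', 'z', 'D', '*', 'U', '*']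
--
--             new_lst = ['a', 'b', 'z', 'D', 'U', '^', '*', '*']
--
--     """
--     carrot = []
--     star = []
--     other = []
--     for i in range(len(char_lst)):
--         if char_lst[i] == '^':
--             carrot.append(char_lst[i])
--         elif char_lst[i] == '*':
--             star.append(char_lst[i])
--         else:
--             other.append(char_lst[i])
--     return other + carrot + star
-- ===== SOURCE B (Python) =====
-- def star_point(char_lst):
--     # Idiomatic: one stable sort keyed by bucket rank (others < '^' < '*')
--     # instead of three explicit bucket lists.
--     return sorted(char_lst, key=lambda c: 0 if c not in ('^', '*') else (1 if c == '^' else 2))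
-- ===== Notes on version B (the rewrite author's own statement) =====
-- stated objective: idiomatic
-- what changed: Replaces the three-bucket partition loop with a single stable sort keyed by bucket rank (non-special=0, '^'=1, '*'=2); stability preserves the original relative order within each bucket.
import Mathlib
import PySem

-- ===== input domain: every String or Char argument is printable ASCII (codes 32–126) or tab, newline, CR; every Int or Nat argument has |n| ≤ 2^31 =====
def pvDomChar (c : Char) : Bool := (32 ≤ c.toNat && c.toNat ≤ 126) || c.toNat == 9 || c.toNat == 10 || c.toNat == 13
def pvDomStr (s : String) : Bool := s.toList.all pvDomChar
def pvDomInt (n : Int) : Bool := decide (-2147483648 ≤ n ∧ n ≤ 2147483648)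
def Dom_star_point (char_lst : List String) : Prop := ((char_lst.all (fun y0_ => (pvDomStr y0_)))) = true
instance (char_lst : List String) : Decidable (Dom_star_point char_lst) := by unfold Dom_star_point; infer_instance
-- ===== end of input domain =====

-- B replaces A's three explicit bucket lists with one stable sort keyed by bucket rank (idiomatic; not faster).

-- ===== PORT A =====
-- A: index loop over range(len(char_lst)) appending each element to one of three buckets,
-- then other + carrot + star.
def star_point (char_lst : List String) : List String :=
  let s := (PySem.List.pyRange 0 (char_lst.length : Int) 1).foldl
      (fun (acc : List String × List String × List String) i =>
        let c := PySem.List.pyGetD char_lst i ""   -- char_lst[i]; i always in range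
        if c = "^" then (acc.1 ++ [c], acc.2.1, acc.2.2)
        else if c = "*" then (acc.1, acc.2.1 ++ [c], acc.2.2)
        else (acc.1, acc.2.1, acc.2.2 ++ [c]))
      ([], [], [])
  s.2.2 ++ s.1 ++ s.2.1

-- ===== PORT B =====
-- key = lambda c: 0 if c not in ('^','*') else (1 if c == '^' else 2)
def pvRank (c : String) : Int :=
  if ¬ (c = "^" ∨ c = "*") then 0 else if c = "^" then 1 else 2

def star_point_alt (char_lst : List String) : List String :=
  PySem.List.sorted char_lst (fun c => pvRank c)

-- ===== PRECONDITION & SPEC =====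
def Spec_star_point (char_lst : List String) (out : List String) : Prop := out = star_point_alt char_lst
instance (char_lst : List String) (out : List String) : Decidable (Spec_star_point char_lst out) := by unfold Spec_star_point; infer_instance

-- ===== CLAIM (what is proved, stated in full; the proofs are below) =====
def Claim_equal_star_point : Prop := ∀ (char_lst : List String), Dom_star_point char_lst → Spec_star_point char_lst (star_point char_lst)

-- ===== LEMMAS AND PROOFS =====

-- Inserting x into L1 ++ L2 lands exactly between them when x is not-before all of L1
-- and before all of L2.
theorem insertBy_between {α : Type} (before : α → α → Bool) (x : α) (L1 L2 : List α)
    (h1 : ∀ y ∈ L1, before x y = false) (h2 : ∀ y ∈ L2, before x y = true) :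
    PySem.List.insertBy before x (L1 ++ L2) = L1 ++ x :: L2 := by
  induction L1 with
  | nil =>
    cases L2 with
    | nil => rfl
    | cons y ys =>
      simp [PySem.List.insertBy, h2 y (by simp)]
  | cons a as ih =>
    have ha : before x a = false := h1 a (by simp)
    simp only [List.cons_append, PySem.List.insertBy, ha]
    simp [ih (fun y hy => h1 y (by simp [hy]))]

-- filter abbreviation: the bucket of rank k
def bucket (k : Int) (xs : List String) : List String :=
  xs.filter (fun c => pvRank c = k)

theorem pvRank_mem_bucket {k : Int} {xs : List String} {y : String}
    (hy : y ∈ bucket k xs) : pvRank y = k := by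
  have := List.of_mem_filter hy
  simpa using this

-- The stable sort by rank is the three buckets in rank order.
theorem sorted_rank_eq_buckets (xs : List String) :
    PySem.List.sorted xs (fun c => pvRank c) = bucket 0 xs ++ bucket 1 xs ++ bucket 2 xs := by
  rw [PySem.List.sorted_eq_foldl_insertBy]
  induction xs using List.reverseRecOn with
  | nil => rfl
  | append_singleton xs x ih =>
    rw [List.foldl_append, List.foldl_cons, List.foldl_nil, ih]
    have hr : pvRank x = 0 ∨ pvRank x = 1 ∨ pvRank x = 2 := by
      unfold pvRank; split_ifs <;> simp
    have hb : ∀ k, bucket k (xs ++ [x]) =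
        bucket k xs ++ (if pvRank x = k then [x] else []) := by
      intro k; unfold bucket; rw [List.filter_append]; congr 1
      by_cases h : pvRank x = k <;> simp [List.filter, h]
    rcases hr with h | h | h
    · rw [List.append_assoc,
        insertBy_between _ x (bucket 0 xs) (bucket 1 xs ++ bucket 2 xs)
          (by intro y hy; have := pvRank_mem_bucket hy; simp [h, this])
          (by intro y hy; rcases List.mem_append.1 hy with hy | hy <;>
              · have := pvRank_mem_bucket hy; simp [h, this])]
      simp [hb, h]
    · rw [List.append_assoc,
        show bucket 0 xs ++ (bucket 1 xs ++ bucket 2 xs)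
          = (bucket 0 xs ++ bucket 1 xs) ++ bucket 2 xs by simp,
        insertBy_between _ x (bucket 0 xs ++ bucket 1 xs) (bucket 2 xs)
          (by intro y hy; rcases List.mem_append.1 hy with hy | hy <;>
              · have := pvRank_mem_bucket hy; simp [h, this])
          (by intro y hy; have := pvRank_mem_bucket hy; simp [h, this])]
      simp [hb, h]
    · rw [List.append_assoc,
        PySem.List.insertBy_of_forall_not_before _ x _
          (by intro y hy
              rcases List.mem_append.1 hy with hy | hy
              · have := pvRank_mem_bucket hy; simp [h, this]
              · rcases List.mem_append.1 hy with hy | hy <;>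
                  · have := pvRank_mem_bucket hy; simp [h, this])]
      simp [hb, h]

-- A's index loop over any accumulator: the three buckets accumulate behind the start state.
theorem starA_foldl (xs : List String) (c s o : List String) :
    xs.foldl
      (fun (acc : List String × List String × List String) c =>
        if c = "^" then (acc.1 ++ [c], acc.2.1, acc.2.2)
        else if c = "*" then (acc.1, acc.2.1 ++ [c], acc.2.2)
        else (acc.1, acc.2.1, acc.2.2 ++ [c]))
      (c, s, o)
    = (c ++ bucket 1 xs, s ++ bucket 2 xs, o ++ bucket 0 xs) := by
  induction xs generalizing c s o with
  | nil => simp [bucket]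
  | cons x xs ih =>
    have hb : ∀ k, bucket k (x :: xs) =
        (if pvRank x = k then [x] else []) ++ bucket k xs := by
      intro k; unfold bucket
      by_cases h : pvRank x = k <;> simp [List.filter, h]
    by_cases h1 : x = "^"
    · subst h1
      simp only [List.foldl_cons, if_pos rfl, ih]
      simp only [Prod.mk.injEq]
      refine ⟨?_, ?_, ?_⟩ <;> rw [hb] <;> simp [pvRank]
    · by_cases h2 : x = "*"
      · subst h2
        simp only [List.foldl_cons, if_neg h1, ih]
        simp only [Prod.mk.injEq]
        refine ⟨?_, ?_, ?_⟩ <;> rw [hb] <;> simp [pvRank]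
      · simp only [List.foldl_cons, if_neg h1, if_neg h2, ih]
        simp only [Prod.mk.injEq]
        refine ⟨?_, ?_, ?_⟩ <;> rw [hb] <;> simp [pvRank, h1, h2]

theorem star_point_eq_buckets (xs : List String) :
    star_point xs = bucket 0 xs ++ bucket 1 xs ++ bucket 2 xs := by
  unfold star_point
  rw [PySem.List.foldl_pyRange_zero_pyGetD' xs ""
      (fun (acc : List String × List String × List String) c =>
        if c = "^" then (acc.1 ++ [c], acc.2.1, acc.2.2)
        else if c = "*" then (acc.1, acc.2.1 ++ [c], acc.2.2)
        else (acc.1, acc.2.1, acc.2.2 ++ [c])) ([], [], [])]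
  rw [starA_foldl xs [] [] []]
  simp

-- ===== VERDICT (by name: the statement is the Claim_ definition above) =====
theorem star_point_spec : Claim_equal_star_point := by
  intro xs _
  unfold Spec_star_point star_point_alt
  rw [star_point_eq_buckets, sorted_rank_eq_buckets]
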